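-- pv_equiv track=rewrite | github.com/DziarnowskiJ/AoC_2025 | utils/search.py | paths_count
-- ===== SOURCE A (Python) =====
-- from functools import lru_cache
--
-- def paths_count(start, end, conns):
--     @lru_cache(maxsize=None)
--     def _path_count(curr, target):
--         if curr == target:
--             return 1
--         return sum(_path_count(n, target) for n in conns[curr])
--
--     _path_count.cache_clear()
--     return _path_count(start, end)
-- ===== SOURCE B (Python) =====
-- def paths_count(start, end, conns):
--     # Bottom-up rounds DP: iterate the counting map len(conns)+1 times
--     # (longest acyclic chain of keys), then read off the start entry.
--     count = {}
--     for _ in range(len(conns) + 1):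
--         count = {x: 1 if x == end else
--                     sum(1 if n == end else count.get(n, 0) for n in succs)
--                  for x, succs in conns.items()}
--     return 1 if start == end else count[start]
-- ===== Notes on version B (the rewrite author's own statement) =====
-- stated objective: alternative
-- what changed: Replaces A's top-down recursive lru_cache path counter by a bottom-up dynamic program: a counting table over all keys is rebuilt len(conns)+1 rounds by a dict comprehension, then the answer is read off at start.
import Mathlib
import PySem

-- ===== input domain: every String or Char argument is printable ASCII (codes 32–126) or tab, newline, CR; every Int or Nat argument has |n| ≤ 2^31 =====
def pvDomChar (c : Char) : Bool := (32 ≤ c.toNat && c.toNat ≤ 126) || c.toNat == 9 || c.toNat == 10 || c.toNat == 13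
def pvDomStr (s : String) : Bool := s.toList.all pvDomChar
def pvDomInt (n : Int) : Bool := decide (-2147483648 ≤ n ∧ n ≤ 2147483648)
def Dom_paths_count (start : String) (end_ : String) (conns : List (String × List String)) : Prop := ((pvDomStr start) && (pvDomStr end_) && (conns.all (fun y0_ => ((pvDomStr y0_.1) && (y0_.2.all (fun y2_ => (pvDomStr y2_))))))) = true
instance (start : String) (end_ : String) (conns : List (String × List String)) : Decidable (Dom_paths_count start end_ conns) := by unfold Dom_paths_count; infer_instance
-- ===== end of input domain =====

-- B replaces A's recursive lru_cache path counter by a bottom-up rounds DP over the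
-- whole connection table (objective: alternative decomposition, no speed claim).

-- ===== PORT A =====
-- first-match association-list lookup = Python dict lookup; the default [] is
-- exact on Pre_ inputs, where every looked-up key is present (Python raises
-- KeyError on a missing key; Pre_ excludes those inputs).
def pvLookup (l : List (String × List String)) (x : String) : List String :=
  match l with
  | [] => []
  | (k, v) :: t => if k == x then v else pvLookup t x

-- A's recursive _path_count. The fuel argument (not in the Python) only bounds
-- the recursion depth: on Pre_ inputs (reachable part acyclic and closed) every
-- recursion chain has at most conns.length distinct keys, so the initial fuel
-- conns.length + 1 is never exhausted.  lru_cache does not change the value.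
def pcA (conns : List (String × List String)) (target : String) : Nat → String → Int
  | fuel, curr =>
    if curr == target then 1
    else
      match fuel with
      | 0 => 0
      | f + 1 => ((pvLookup conns curr).map (fun n => pcA conns target f n)).sum

def paths_count (start : String) (end_ : String) (conns : List (String × List String)) : Int :=
  pcA conns end_ (conns.length + 1) start

-- ===== PORT B =====
-- first-match lookup with default 0 = count.get(n, 0)
def pvGet0 (l : List (String × Int)) (x : String) : Int :=
  match l with
  | [] => 0
  | (k, v) :: t => if k == x then v else pvGet0 t x

-- one round of B's dict comprehension (exact: Pre_ inputs have no duplicate keys)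
def pcRound (end_ : String) (conns : List (String × List String)) (count : List (String × Int)) : List (String × Int) :=
  conns.map (fun p =>
    (p.1, if p.1 == end_ then 1
          else (p.2.map (fun n => if n == end_ then 1 else pvGet0 count n)).sum))

def paths_count_alt (start : String) (end_ : String) (conns : List (String × List String)) : Int :=
  let count := (List.range (conns.length + 1)).foldl (fun c _ => pcRound end_ conns c) []
  -- count[start]: on Pre_ inputs start is a key whenever start ≠ end_ (Python
  -- raises KeyError otherwise, excluded by Pre_), so the default 0 is exact.
  if start == end_ then 1 else pvGet0 count start

-- ===== PRECONDITION & SPEC =====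
-- successors used by A's recursion: recursion stops at the target
def pvSuccs (conns : List (String × List String)) (end_ : String) (x : String) : List String :=
  if x == end_ then [] else pvLookup conns x

def pvGrow (conns : List (String × List String)) (end_ : String) (R : List String) : List String :=
  (R ++ R.flatMap (pvSuccs conns end_)).dedup

def pvReach (conns : List (String × List String)) (end_ : String) (s : List String) : List String :=
  (pvGrow conns end_)^[conns.length + 2] s

-- Pre_ = exactly the inputs where Python A returns: no duplicate keys (a Python
-- dict cannot carry them), every node reachable from start (stopping at end_)
-- is end_ or a key of conns (else KeyError), and no such reachable node lies on
-- a cycle (else RecursionError).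
def Pre_paths_count (start : String) (end_ : String) (conns : List (String × List String)) : Prop :=
  (conns.map Prod.fst).Nodup ∧
  (∀ x ∈ pvReach conns end_ [start], x = end_ ∨ x ∈ conns.map Prod.fst) ∧
  (∀ k ∈ pvReach conns end_ [start], k ∉ pvReach conns end_ (pvSuccs conns end_ k))

instance (start : String) (end_ : String) (conns : List (String × List String)) : Decidable (Pre_paths_count start end_ conns) := by unfold Pre_paths_count; infer_instance

def pvWitness_paths_count : String × String × (List (String × List String)) :=
  ("a", "c", [("a", ["b", "c"]), ("b", ["c"])])

def Spec_paths_count (start : String) (end_ : String) (conns : List (String × List String)) (out : Int) : Prop := out = paths_count_alt start end_ conns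
instance (start : String) (end_ : String) (conns : List (String × List String)) (out : Int) : Decidable (Spec_paths_count start end_ conns out) := by unfold Spec_paths_count; infer_instance

-- ===== CLAIM (what is proved, stated in full; the proofs are below) =====
def Claim_equal_paths_count : Prop := ∀ (start : String) (end_ : String) (conns : List (String × List String)), Dom_paths_count start end_ conns → Pre_paths_count start end_ conns → Spec_paths_count start end_ conns (paths_count start end_ conns)

-- ===== LEMMAS AND PROOFS =====

-- looking up x in the mapped table pcRound reads off the first match of x in l
lemma pvGet0_pcRound (end_ : String) (l : List (String × List String))
    (count : List (String × Int)) (x : String) :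
    pvGet0 (pcRound end_ l count) x =
      if (l.map Prod.fst).contains x then
        (if x == end_ then 1
         else ((pvLookup l x).map (fun n => if n == end_ then 1 else pvGet0 count n)).sum)
      else 0 := by
  induction l with
  | nil => simp [pcRound, pvGet0]
  | cons p t ih =>
    simp only [pcRound, List.map_cons, pvGet0, pvLookup, List.contains_cons]
    by_cases h : p.1 == x
    · have hx : p.1 = x := by simpa using h
      subst hx
      simp
    · have hpx : (p.1 == x) = false := by simpa using h
      have hxp : (x == p.1) = false := by
        simp only [beq_eq_false_iff_ne] at hpx ⊢
        exact fun e => hpx e.symm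
      simp only [hpx, hxp, Bool.false_or, Bool.false_eq_true, if_false]
      exact ih

-- a key absent from the table looks up to []
lemma pvLookup_eq_nil (l : List (String × List String)) (x : String)
    (h : (l.map Prod.fst).contains x = false) : pvLookup l x = [] := by
  induction l with
  | nil => rfl
  | cons p t ih =>
    simp only [List.map_cons, List.contains_cons, Bool.or_eq_false_iff] at h
    have : (p.1 == x) = false := by
      simp only [beq_eq_false_iff_ne] at h ⊢
      exact fun e => h.1 e.symm
    simp only [pvLookup, this, Bool.false_eq_true, if_false]
    exact ih h.2

-- the table after i rounds agrees with A's recursion at fuel i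
lemma table_eq_pcA (end_ : String) (conns : List (String × List String)) :
    ∀ (i : Nat) (x : String),
      (if x == end_ then 1
       else pvGet0 ((List.range i).foldl (fun c _ => pcRound end_ conns c) []) x) =
      pcA conns end_ i x := by
  intro i
  induction i with
  | zero =>
    intro x
    simp only [List.range_zero, List.foldl_nil, pcA, pvGet0]
  | succ i ih =>
    intro x
    rw [List.range_succ, List.foldl_append, List.foldl_cons, List.foldl_nil]
    by_cases hx : x == end_
    · simp [pcA, hx]
    · have hxf : (x == end_) = false := by simpa using hx
      simp only [hxf, Bool.false_eq_true, if_false]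
      rw [pvGet0_pcRound]
      by_cases hmem : (conns.map Prod.fst).contains x
      · simp only [hmem, if_true, hxf, Bool.false_eq_true, if_false, pcA]
        congr 1
        apply List.map_congr_left
        intro n _
        exact ih n
      · have hmf : ((conns.map Prod.fst).contains x) = false := by simpa using hmem
        simp [pcA, hxf, pvLookup_eq_nil conns x hmf]

-- ===== VERDICT (by name: the statement is the Claim_ definition above) =====
theorem paths_count_spec : Claim_equal_paths_count := by
  intro start end_ conns _ _
  unfold Spec_paths_count paths_count paths_count_alt
  rw [← table_eq_pcA end_ conns (conns.length + 1) start]
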